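-- pv_equiv track=rewrite | github.com/mccartykim/csit104-term-project | source/Entity.py | loop_lines
-- ===== SOURCE A (Python) =====
-- def loop_lines(points):
--      #test if points are even
--     out = []
--     if len(points) % 2 != 0:
--         raise ValueError("Uneven list of points")
--     i = 0
--     while i < len(points) - 3:
--         out.extend(points[i:i+4])
--         i += 2
--     out.extend(points[-2::])
--     out.extend(points[0:2])
--     return tuple(out)
-- ===== SOURCE B (Python) =====
-- def loop_lines(points):
--     # test if points are even
--     if len(points) % 2 != 0:
--         raise ValueError("Uneven list of points")
--     # close the ring, chop into coordinate pairs, then emit each interior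
--     # pair twice (it ends one segment and starts the next); the first and
--     # last pair of the closed ring appear once each.
--     ext = list(points) + list(points[:2])
--     pairs = [ext[i:i + 2] for i in range(0, len(ext), 2)]
--     middle = []
--     for pair in pairs[1:-1]:
--         middle.extend(pair * 2)
--     return tuple(ext[:2] + middle + ext[-2:])
-- ===== Notes on version B (the rewrite author's own statement) =====
-- stated objective: alternative
-- what changed: B first builds the closed ring (points plus the first pair), chops it into a list of coordinate pairs in one staged pass, and then emits every interior pair twice between the unchanged first and last pair, instead of A's sliding 4-element window with a special appended closing tail.
import Mathlib
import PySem

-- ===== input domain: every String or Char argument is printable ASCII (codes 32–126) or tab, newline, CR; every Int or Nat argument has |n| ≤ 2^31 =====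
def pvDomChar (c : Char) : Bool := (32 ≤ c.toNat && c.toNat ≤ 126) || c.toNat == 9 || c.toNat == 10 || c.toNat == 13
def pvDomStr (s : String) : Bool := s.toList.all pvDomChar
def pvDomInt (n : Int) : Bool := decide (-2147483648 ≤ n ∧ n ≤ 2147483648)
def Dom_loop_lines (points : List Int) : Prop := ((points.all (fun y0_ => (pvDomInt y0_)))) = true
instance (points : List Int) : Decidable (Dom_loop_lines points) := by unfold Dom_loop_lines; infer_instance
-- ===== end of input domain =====

-- B builds the closed ring (points + first pair), chops it into coordinate pairs in a staged
-- pass, and emits every interior pair twice between the first and last pair — a different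
-- decomposition from A's sliding 4-element window with an appended closing tail; same O(n) cost.

-- ===== PORT A =====
-- the 'while i < len(points) - 3: … ; i += 2' loop is the fold over range(0, len(points)-3, 2)
def loop_lines (points : List Int) : List Int :=
  let out : List Int := []
  let out := (PySem.List.pyRange 0 ((points.length : Int) - 3) 2).foldl
      (fun acc i => acc ++ PySem.List.slice points (some i) (some (i + 4))) out
  let out := out ++ PySem.List.slice points (some (-2)) none
  let out := out ++ PySem.List.slice points (some 0) (some 2)
  out

-- ===== PORT B =====
-- ext = points + points[:2]; pairs = [ext[i:i+2] for i in range(0, len(ext), 2)];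
-- middle extends each pair of pairs[1:-1] twice; result = ext[:2] + middle + ext[-2:]
def loop_lines_alt (points : List Int) : List Int :=
  let ext := points ++ PySem.List.slice points (some 0) (some 2)
  let pairs := (PySem.List.pyRange 0 ((ext.length : Int)) 2).map
      (fun i => PySem.List.slice ext (some i) (some (i + 2)))
  let middle := (PySem.List.slice pairs (some 1) (some (-1))).foldl
      (fun acc pr => acc ++ (pr ++ pr)) []
  PySem.List.slice ext (some 0) (some 2) ++ middle ++ PySem.List.slice ext (some (-2)) none

-- ===== PRECONDITION & SPEC =====
-- A (and B) raise ValueError on odd-length input; Pre_ excludes exactly those inputs.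
def Pre_loop_lines (points : List Int) : Prop := points.length % 2 = 0
instance (points : List Int) : Decidable (Pre_loop_lines points) := by unfold Pre_loop_lines; infer_instance
def pvWitness_loop_lines : List Int := [1, 2, 3, 4, 5, 6]

def Spec_loop_lines (points : List Int) (out : List Int) : Prop := out = loop_lines_alt points
instance (points : List Int) (out : List Int) : Decidable (Spec_loop_lines points out) := by unfold Spec_loop_lines; infer_instance

-- ===== CLAIM (what is proved, stated in full; the proofs are below) =====
def Claim_equal_loop_lines : Prop := ∀ (points : List Int), Dom_loop_lines points → Pre_loop_lines points → Spec_loop_lines points (loop_lines points)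

-- ===== LEMMAS AND PROOFS =====

theorem pv_slice_take2 (points : List Int) : PySem.List.slice points (some 0) (some 2) = List.take 2 points := by
  rw [PySem.List.slice_zero_start, PySem.List.slice_to points (by norm_num : (0:Int) ≤ 2)]
  rfl

theorem pv_slice_interior {α : Type} (xs : List α) (hx : xs ≠ []) :
    PySem.List.slice xs (some 1) (some (-1)) = (xs.drop 1).take (xs.length - 2) := by
  have hlen : 1 ≤ xs.length := List.length_pos_of_ne_nil hx
  simp [PySem.List.slice, PySem.List.clampIdx, hx]
  have hm : min 1 xs.length = 1 := by omega
  rw [hm]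
  congr 1
  · omega
  · simp

-- moving the closing copy of f 0 to the front turns the edge list into doubled interior pairs
theorem pv_swap_lemma (f : Nat → List Int) (q : Nat) :
    (List.range q).flatMap (fun k => f k ++ f (k + 1)) ++ f q
      = f 0 ++ (List.range q).flatMap (fun k => f (k + 1) ++ f (k + 1)) := by
  induction q with
  | zero => simp
  | succ n ih =>
    rw [List.range_succ, List.flatMap_append, List.flatMap_append]
    simp only [List.flatMap_cons, List.flatMap_nil, List.append_nil]
    calc ((List.range n).flatMap (fun k => f k ++ f (k + 1)) ++ (f n ++ f (n + 1))) ++ f (n + 1)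
        = ((List.range n).flatMap (fun k => f k ++ f (k + 1)) ++ f n) ++ (f (n + 1) ++ f (n + 1)) := by
          simp [List.append_assoc]
      _ = f 0 ++ ((List.range n).flatMap (fun k => f (k + 1) ++ f (k + 1)) ++ (f (n + 1) ++ f (n + 1))) := by
          rw [ih]; simp [List.append_assoc]

theorem b_canon (points : List Int) (p : Nat) (h : points.length = 2 * p) (hp : 1 ≤ p) :
    loop_lines_alt points
    = List.take 2 points
      ++ (List.range (p - 1)).flatMap
          (fun k => List.take 2 (List.drop (2 * (k + 1)) points) ++ List.take 2 (List.drop (2 * (k + 1)) points))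
      ++ List.take 2 points := by
  unfold loop_lines_alt
  dsimp only
  simp only [pv_slice_take2]
  have ht2len : (List.take 2 points).length = 2 := by simp; omega
  have hextlen : (points ++ List.take 2 points).length = 2 * p + 2 := by simp; omega
  have hcnt : (if (0:Int) < ((points ++ List.take 2 points).length : Int)
      then ((((points ++ List.take 2 points).length : Int) - 0 + 2 - 1) / 2).toNat else 0) = p + 1 := by
    rw [hextlen]; split_ifs <;> push_cast <;> omega
  rw [PySem.List.pyRange_of_pos 0 _ (by norm_num : (0:Int) < 2), hcnt, List.map_map]
  set ext := points ++ List.take 2 points with hext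
  have hQ : ∀ k : Nat, ((fun i => PySem.List.slice ext (some i) (some (i + 2))) ∘ fun k : Nat => 0 + 2 * (k:Int)) k
      = List.take 2 (List.drop (2 * k) ext) := by
    intro k
    simp only [Function.comp, zero_add]
    have := PySem.List.slice_natCast_add ext (2 * k) 2
    push_cast at this
    exact this
  rw [List.map_congr_left (fun k _ => hQ k)]
  have hplen : ((List.range (p + 1)).map (fun k => List.take 2 (List.drop (2 * k) ext))).length = p + 1 := by simp
  rw [pv_slice_interior _ (by simp)]
  rw [hplen]
  have hdrop1 : ((List.range (p + 1)).map (fun k => List.take 2 (List.drop (2 * k) ext))).drop 1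
      = (List.range p).map (fun k => List.take 2 (List.drop (2 * (k + 1)) ext)) := by
    rw [List.range_succ_eq_map]
    simp [List.map_map, Function.comp, Nat.succ_eq_add_one]
  rw [hdrop1]
  have htake : ((List.range p).map (fun k => List.take 2 (List.drop (2 * (k + 1)) ext))).take (p + 1 - 2)
      = (List.range (p - 1)).map (fun k => List.take 2 (List.drop (2 * (k + 1)) ext)) := by
    rw [← List.map_take, List.take_range]
    have hm2 : min (p + 1 - 2) p = p - 1 := by omega
    rw [hm2]
  rw [htake, PySem.List.foldl_append_eq_flatMap, List.nil_append, List.flatMap_map]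
  have hint : ∀ k ∈ List.range (p - 1),
      List.take 2 (List.drop (2 * (k + 1)) ext) ++ List.take 2 (List.drop (2 * (k + 1)) ext)
      = List.take 2 (List.drop (2 * (k + 1)) points) ++ List.take 2 (List.drop (2 * (k + 1)) points) := by
    intro k hk
    have hklt : k < p - 1 := List.mem_range.mp hk
    have hdd : List.drop (2 * (k + 1)) ext = List.drop (2 * (k + 1)) points ++ List.take 2 points := by
      rw [hext, List.drop_append_of_le_length (by omega)]
    rw [hdd, List.take_append_of_le_length (by simp; omega)]
  rw [List.flatMap_congr hint]
  have hhead : List.take 2 ext = List.take 2 points := by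
    rw [hext, List.take_append_of_le_length (by omega)]
  have htail : PySem.List.slice ext (some (-2)) none = List.take 2 points := by
    rw [PySem.List.slice_from_neg_ofNat ext 2 (by omega), hext]
    have : (points ++ List.take 2 points).length - 2 = points.length := by simp; omega
    rw [this, List.drop_left]
  rw [hhead, htail]

theorem a_canon (points : List Int) (p : Nat) (h : points.length = 2 * p) (hp : 1 ≤ p) :
    loop_lines points
    = (List.range (p - 1)).flatMap
        (fun k => List.take 2 (List.drop (2 * k) points) ++ List.take 2 (List.drop (2 * (k + 1)) points))
      ++ List.take 2 (List.drop (2 * (p - 1)) points) ++ List.take 2 points := by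
  unfold loop_lines
  dsimp only
  have hcnt : (if (0:Int) < ((points.length : Int) - 3)
      then (((points.length : Int) - 3 - 0 + 2 - 1) / 2).toNat else 0) = p - 1 := by
    rw [h]; split_ifs <;> push_cast <;> omega
  rw [PySem.List.pyRange_of_pos 0 _ (by norm_num : (0:Int) < 2), hcnt,
      PySem.List.foldl_append_eq_flatMap, List.nil_append, List.flatMap_map]
  have hA : ∀ k ∈ List.range (p - 1),
      (fun i => PySem.List.slice points (some i) (some (i + 4))) ((fun k : Nat => 0 + 2 * (k : Int)) k)
      = List.take 2 (List.drop (2 * k) points) ++ List.take 2 (List.drop (2 * (k + 1)) points) := by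
    intro k _
    dsimp only
    have hs : PySem.List.slice points (some (0 + 2 * (k : Int))) (some (0 + 2 * (k : Int) + 4))
        = List.take 4 (List.drop (2 * k) points) := by
      have := PySem.List.slice_natCast_add points (2 * k) 4
      push_cast at this ⊢
      simpa using this
    rw [hs, show (4 : Nat) = 2 + 2 from rfl, List.take_add, List.drop_drop]
    congr 2
  rw [List.flatMap_congr hA]
  have htail : PySem.List.slice points (some (-2)) none
      = List.take 2 (List.drop (2 * (p - 1)) points) := by
    rw [PySem.List.slice_from_neg_ofNat points 2 (by omega)]
    have h1 : points.length - 2 = 2 * (p - 1) := by omega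
    rw [h1, List.take_of_length_le (by simp; omega)]
  rw [htail, pv_slice_take2]

theorem loop_lines_main (points : List Int) (p : Nat) (h : points.length = 2 * p) (hp : 1 ≤ p) :
    loop_lines points = loop_lines_alt points := by
  rw [a_canon points p h hp, b_canon points p h hp]
  have hs := pv_swap_lemma (fun k => List.take 2 (List.drop (2 * k) points)) (p - 1)
  simp only [Nat.mul_zero, List.drop_zero] at hs
  rw [hs]

-- ===== VERDICT (by name: the statement is the Claim_ definition above) =====
theorem loop_lines_spec : Claim_equal_loop_lines := by
  intro points _ hpre
  unfold Pre_loop_lines at hpre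
  unfold Spec_loop_lines
  rcases Nat.eq_zero_or_pos (points.length / 2) with h0 | h1
  · have : points = [] := by
      cases points with
      | nil => rfl
      | cons a t =>
          exfalso
          simp only [List.length_cons] at h0 hpre
          omega
    subst this; decide
  · exact loop_lines_main points (points.length / 2) (by omega) h1
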